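-- pv_equiv track=rewrite | github.com/secure-foundations/vest | vest-dsl/test/test_fmt_nested.py | fmt_in_pairs
-- ===== SOURCE A (Python) =====
-- def fmt_in_pairs(tuples, prepend, bracket):
--     brackets = {
--         "Parentheses": ("(", ")"),
--         "Angle": ("<", ">"),
--         "Square": ("[", "]"),
--     }
--     left, right = brackets[bracket]
--     if not tuples:
--         return ""
--     *rest, last = tuples
--     acc = str(last)
--     for t in reversed(rest):
--         acc = f"{prepend}{left}{t}, {acc}{right}"
--     return acc
-- ===== SOURCE B (Python) =====
-- def fmt_in_pairs(tuples, prepend, bracket):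
--     left, right = {"Parentheses": "()", "Angle": "<>", "Square": "[]"}[bracket]
--     if not tuples:
--         return ""
--     n = len(tuples) - 1
--     return "".join([prepend + left + t + ", " for t in tuples[:n]]
--                    + [str(tuples[-1])]
--                    + [right] * n)
-- ===== Notes on version B (the rewrite author's own statement) =====
-- stated objective: simpler
-- what changed: Replaced A's right-to-left accumulator fold (re-wrapping the growing string once per element) by a single flat join: per-element prefixes for tuples[:n], the last element, and the closing bracket repeated n times, exploiting that nesting only ever appends closers at the tail; the bracket pair is unpacked from a two-char string instead of a tuple.
import Mathlib
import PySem

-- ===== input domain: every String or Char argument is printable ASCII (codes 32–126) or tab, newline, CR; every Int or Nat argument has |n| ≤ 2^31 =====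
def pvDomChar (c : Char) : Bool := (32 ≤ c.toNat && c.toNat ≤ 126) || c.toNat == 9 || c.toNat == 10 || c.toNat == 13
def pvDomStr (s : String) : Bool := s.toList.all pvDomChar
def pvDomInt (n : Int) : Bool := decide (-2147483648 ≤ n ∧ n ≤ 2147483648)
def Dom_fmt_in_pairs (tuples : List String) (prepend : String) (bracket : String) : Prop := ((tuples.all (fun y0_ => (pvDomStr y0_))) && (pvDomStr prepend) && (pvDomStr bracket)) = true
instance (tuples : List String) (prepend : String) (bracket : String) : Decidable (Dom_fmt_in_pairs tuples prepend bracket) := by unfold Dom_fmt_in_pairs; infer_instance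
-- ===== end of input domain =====

-- B replaces A's right-to-left accumulator fold by a single flat join (prefixes, last element,
-- the closing bracket repeated), for simplicity; return values only.

-- ===== PORT A =====
def fmt_in_pairs (tuples : List String) (prepend : String) (bracket : String) : String :=
  let brackets : PySem.Dict String (String × String) :=
    PySem.Dict.ofList [("Parentheses", ("(", ")")), ("Angle", ("<", ">")), ("Square", ("[", "]"))]
  match brackets.get? bracket with
  | none => ""  -- Python raises KeyError here; excluded by Pre_
  | some (left, right) =>
    match tuples.getLast? with
    | none => ""                       -- `if not tuples: return ""`
    | some last =>                     -- `*rest, last = tuples`; acc = str(last)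
      (tuples.dropLast.reverse).foldl  -- `for t in reversed(rest)`
        (fun acc t => prepend ++ left ++ t ++ ", " ++ acc ++ right) last

-- ===== PORT B =====
def fmt_in_pairs_alt (tuples : List String) (prepend : String) (bracket : String) : String :=
  -- `left, right = {...}[bracket]` : the value is a two-character string, unpacked by position
  match (PySem.Dict.ofList
      [("Parentheses", "()"), ("Angle", "<>"), ("Square", "[]")] : PySem.Dict String String).get? bracket with
  | none => ""  -- Python raises KeyError here; excluded by Pre_
  | some pr =>
    let left := String.ofList (pr.toList.take 1)   -- pr[0] (exact: pr has length 2)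
    let right := String.ofList (pr.toList.drop 1)  -- pr[1] (exact: pr has length 2)
    match tuples with
    | [] => ""                                     -- `if not tuples: return ""`
    | _ :: _ =>
      let n := tuples.length - 1
      PySem.Str.join ""                            -- "".join( … )
        ((tuples.take n).map (fun t => prepend ++ left ++ t ++ ", ")   -- [… for t in tuples[:n]]
          ++ [(PySem.List.pyGet? tuples (-1)).getD ""]                 -- [str(tuples[-1])]; some: tuples ≠ []
          ++ List.replicate n right)                                   -- [right] * n

-- ===== PRECONDITION & SPEC =====
-- Pre_ excludes bracket names outside the three-key dict, on which Python A raises KeyError.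
def Pre_fmt_in_pairs (tuples : List String) (prepend : String) (bracket : String) : Prop :=
  bracket = "Parentheses" ∨ bracket = "Angle" ∨ bracket = "Square"
instance (tuples : List String) (prepend : String) (bracket : String) : Decidable (Pre_fmt_in_pairs tuples prepend bracket) := by unfold Pre_fmt_in_pairs; infer_instance
def pvWitness_fmt_in_pairs : List String × String × String := (["a", "b"], "p", "Angle")

def Spec_fmt_in_pairs (tuples : List String) (prepend : String) (bracket : String) (out : String) : Prop := out = fmt_in_pairs_alt tuples prepend bracket
instance (tuples : List String) (prepend : String) (bracket : String) (out : String) : Decidable (Spec_fmt_in_pairs tuples prepend bracket out) := by unfold Spec_fmt_in_pairs; infer_instance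

-- ===== CLAIM =====
def Claim_equal_fmt_in_pairs : Prop := ∀ (tuples : List String) (prepend : String) (bracket : String), Dom_fmt_in_pairs tuples prepend bracket → Pre_fmt_in_pairs tuples prepend bracket → Spec_fmt_in_pairs tuples prepend bracket (fmt_in_pairs tuples prepend bracket)

-- ===== LEMMAS AND PROOFS =====
theorem pv_inter_nil_cons (a : List Char) (l : List (List Char)) :
    ([] : List Char).intercalate (a :: l) = a ++ ([] : List Char).intercalate l := by
  cases l <;> simp [List.intercalate, List.intersperse]

theorem pv_join_cons (x : String) (xs : List String) :
    PySem.Str.join "" (x :: xs) = x ++ PySem.Str.join "" xs := by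
  simp [PySem.Str.join, PySem.Chars.join, pv_inter_nil_cons]

theorem pv_join_nil : PySem.Str.join "" ([] : List String) = "" := by decide

theorem pv_join_append (xs ys : List String) :
    PySem.Str.join "" (xs ++ ys) = PySem.Str.join "" xs ++ PySem.Str.join "" ys := by
  induction xs with
  | nil => simp [pv_join_nil]
  | cons x xs ih => simp [pv_join_cons, ih, String.append_assoc]

-- A's reversed fold over `rest` equals B's flat join of prefixes ++ [last] ++ replicated closers
theorem pv_fold_eq_flat (p l r : String) (rest : List String) (last : String) :
    (rest.reverse).foldl (fun acc t => p ++ l ++ t ++ ", " ++ acc ++ r) last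
      = PySem.Str.join "" (rest.map (fun t => p ++ l ++ t ++ ", ") ++ [last]
          ++ List.replicate rest.length r) := by
  induction rest generalizing last with
  | nil => simp [pv_join_cons, pv_join_nil]
  | cons t rs ih =>
    simp only [List.reverse_cons, List.foldl_append, List.foldl_cons, List.foldl_nil,
      List.map_cons, List.cons_append, pv_join_cons, List.length_cons]
    rw [ih]
    simp only [pv_join_append, List.replicate_succ', pv_join_cons, pv_join_nil]
    simp [String.append_assoc]

-- both ports after the (successful) bracket lookup, parametric in left/right
theorem pv_both_sides (t : List String) (p l r : String) :
    (match t.getLast? with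
     | none => ""
     | some last => (t.dropLast.reverse).foldl (fun acc x => p ++ l ++ x ++ ", " ++ acc ++ r) last)
    = (match t with
       | [] => ""
       | _ :: _ =>
         PySem.Str.join "" ((t.take (t.length - 1)).map (fun x => p ++ l ++ x ++ ", ")
           ++ [(PySem.List.pyGet? t (-1)).getD ""] ++ List.replicate (t.length - 1) r)) := by
  cases t with
  | nil => rfl
  | cons a as =>
    have hne : a :: as ≠ [] := by simp
    have hlast : (a :: as).getLast? = some ((a :: as).getLast hne) :=
      List.getLast?_eq_some_getLast hne
    have hget : PySem.List.pyGet? (a :: as) (-1) = some ((a :: as).getLast hne) := by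
      rw [PySem.List.pyGet?_neg_one, hlast]
    have htake : (a :: as).take ((a :: as).length - 1) = (a :: as).dropLast := by
      rw [List.dropLast_eq_take]
    have hlen : (a :: as).length - 1 = (a :: as).dropLast.length := by
      simp [List.length_dropLast]
    rw [hlast, hget]
    simp only [Option.getD_some]
    rw [htake, hlen]
    exact pv_fold_eq_flat p l r (a :: as).dropLast ((a :: as).getLast hne)

-- ===== VERDICT =====
theorem fmt_in_pairs_spec : Claim_equal_fmt_in_pairs := by
  intro tuples prepend bracket _ hpre
  unfold Spec_fmt_in_pairs
  rcases hpre with h | h | h <;> subst h <;>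
    simp only [fmt_in_pairs, fmt_in_pairs_alt]
  · rw [show (PySem.Dict.ofList [("Parentheses", ("(", ")")), ("Angle", ("<", ">")), ("Square", ("[", "]"))] : PySem.Dict String (String × String)).get? "Parentheses" = some ("(", ")") from by decide,
        show (PySem.Dict.ofList [("Parentheses", "()"), ("Angle", "<>"), ("Square", "[]")] : PySem.Dict String String).get? "Parentheses" = some "()" from by decide]
    dsimp only
    rw [show String.ofList ("()".toList.take 1) = "(" from by decide,
        show String.ofList ("()".toList.drop 1) = ")" from by decide]
    exact pv_both_sides tuples prepend "(" ")"
  · rw [show (PySem.Dict.ofList [("Parentheses", ("(", ")")), ("Angle", ("<", ">")), ("Square", ("[", "]"))] : PySem.Dict String (String × String)).get? "Angle" = some ("<", ">") from by decide,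
        show (PySem.Dict.ofList [("Parentheses", "()"), ("Angle", "<>"), ("Square", "[]")] : PySem.Dict String String).get? "Angle" = some "<>" from by decide]
    dsimp only
    rw [show String.ofList ("<>".toList.take 1) = "<" from by decide,
        show String.ofList ("<>".toList.drop 1) = ">" from by decide]
    exact pv_both_sides tuples prepend "<" ">"
  · rw [show (PySem.Dict.ofList [("Parentheses", ("(", ")")), ("Angle", ("<", ">")), ("Square", ("[", "]"))] : PySem.Dict String (String × String)).get? "Square" = some ("[", "]") from by decide,
        show (PySem.Dict.ofList [("Parentheses", "()"), ("Angle", "<>"), ("Square", "[]")] : PySem.Dict String String).get? "Square" = some "[]" from by decide]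
    dsimp only
    rw [show String.ofList ("[]".toList.take 1) = "[" from by decide,
        show String.ofList ("[]".toList.drop 1) = "]" from by decide]
    exact pv_both_sides tuples prepend "[" "]"
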